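-- pv_equiv track=rewrite | github.com/hoomexsun/xlit | src/mt_/conversion.py | parse_phoneme_seq
-- ===== SOURCE A (Python) =====
-- from typing import Dict, List, Set, Tuple
--
-- def parse_phoneme_seq(
--     word_phoneme: List[List[str]],
-- ) -> Tuple[List[str], List[bool]]:
--     """
--     Extract phoneme sequences and split points based on a list of groups of phonemes.
--
--     Args:
--         sup_phoneme (List[List[str]]): A list containing groups of phonemes.
--
--     Returns:
--         Tuple[List[str], List[bool]]: A tuple containing the phoneme sequence and corresponding split points.
--     """
--     phoneme_seq = [
--         phoneme for sup_phoneme in word_phoneme for phoneme in sup_phoneme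
--     ]
--     is_split = [
--         idx == len(ph) - 1 for ph in word_phoneme for idx, _ in enumerate(ph)
--     ]
--     return phoneme_seq, is_split
-- ===== SOURCE B (Python) =====
-- from typing import Dict, List, Set, Tuple
--
-- def parse_phoneme_seq(
--     word_phoneme: List[List[str]],
-- ) -> Tuple[List[str], List[bool]]:
--     phoneme_seq = sum(word_phoneme, [])
--     ends = set()
--     pos = 0
--     for group in word_phoneme:
--         pos += len(group)
--         if group:
--             ends.add(pos - 1)
--     is_split = [i in ends for i in range(pos)]
--     return phoneme_seq, is_split
-- ===== Notes on version B (the rewrite author's own statement) =====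
-- stated objective: alternative
-- what changed: Replaces A's per-element enumerate pass (comparing each within-group index to len-1) with a prefix-sum computation of the global end position of every non-empty group collected into a set, from which is_split is generated positionally as a membership test over range(total); phoneme_seq is built by a sum-fold with list concatenation instead of a nested comprehension.
import Mathlib
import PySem

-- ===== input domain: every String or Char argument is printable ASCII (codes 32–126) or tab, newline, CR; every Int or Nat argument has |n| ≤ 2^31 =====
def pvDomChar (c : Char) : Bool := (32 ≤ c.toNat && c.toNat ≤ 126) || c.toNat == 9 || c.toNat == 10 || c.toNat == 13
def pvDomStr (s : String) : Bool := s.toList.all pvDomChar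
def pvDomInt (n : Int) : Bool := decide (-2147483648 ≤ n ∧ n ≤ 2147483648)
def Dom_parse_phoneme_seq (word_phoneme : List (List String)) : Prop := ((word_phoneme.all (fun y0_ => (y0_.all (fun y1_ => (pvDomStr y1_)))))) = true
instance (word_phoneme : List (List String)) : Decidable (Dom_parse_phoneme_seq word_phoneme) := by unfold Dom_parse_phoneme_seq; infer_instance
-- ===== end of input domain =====

-- B replaces A's per-element enumerate pass by a prefix-sum set of global group-end positions
-- tested positionally over range(total); same values, no speed claim.

-- ===== PORT A =====
-- A: two comprehensions; flatten, then split flags via enumerate index == len-1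
def parse_phoneme_seq (word_phoneme : List (List String)) : List String × List Bool :=
  let phoneme_seq := word_phoneme.flatMap (fun sup_phoneme => sup_phoneme)
  let is_split := word_phoneme.flatMap (fun ph =>
    (PySem.List.enumerate ph).map (fun (p : Int × String) => decide (p.1 = (ph.length : Int) - 1)))
  (phoneme_seq, is_split)

-- ===== PORT B =====
-- B: sum(word_phoneme, []); running position with a set of end positions of non-empty groups;
-- is_split = [i in ends for i in range(pos)]
def parse_phoneme_seq_alt (word_phoneme : List (List String)) : List String × List Bool :=
  let phoneme_seq := word_phoneme.foldl (fun acc g => acc ++ g) []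
  let st := word_phoneme.foldl
    (fun (st : PySem.Set Int × Int) group =>
      let pos := st.2 + (group.length : Int)
      ((if group ≠ [] then PySem.Set.add st.1 (pos - 1) else st.1), pos))
    (PySem.Set.empty, 0)
  let is_split := (PySem.List.pyRange 0 st.2 1).map (fun i => PySem.Set.contains st.1 i)
  (phoneme_seq, is_split)

-- ===== PRECONDITION & SPEC =====
def Spec_parse_phoneme_seq (word_phoneme : List (List String)) (out : List String × List Bool) : Prop := out = parse_phoneme_seq_alt word_phoneme
instance (word_phoneme : List (List String)) (out : List String × List Bool) : Decidable (Spec_parse_phoneme_seq word_phoneme out) := by unfold Spec_parse_phoneme_seq; infer_instance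

-- ===== CLAIM (what is proved, stated in full; the proofs are below) =====
def Claim_equal_parse_phoneme_seq : Prop := ∀ (word_phoneme : List (List String)), Dom_parse_phoneme_seq word_phoneme → Spec_parse_phoneme_seq word_phoneme (parse_phoneme_seq word_phoneme)

-- ===== LEMMAS AND PROOFS =====

-- the boundary positions B's fold collects, as a function of the starting offset
def pvBnds : List (List String) → Int → List Int
  | [], _ => []
  | g :: t, off =>
      (if g ≠ [] then [off + (g.length : Int) - 1] else []) ++ pvBnds t (off + (g.length : Int))

theorem pvBnds_ge : ∀ (wp : List (List String)) (off x : Int), x ∈ pvBnds wp off → off ≤ x := by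
  intro wp
  induction wp with
  | nil => intro off x h; simp [pvBnds] at h
  | cons g t ih =>
    intro off x h
    simp only [pvBnds, List.mem_append] at h
    rcases h with h | h
    · rcases g with _ | ⟨a, g'⟩
      · simp at h
      · simp only [ne_eq, reduceCtorEq, not_false_eq_true, if_pos, List.mem_singleton] at h
        subst h; simp only [List.length_cons]; push_cast; omega
    · have := ih (off + (g.length : Int)) x h; omega

-- characterisation of B's fold: second component and membership of the first
theorem pvFold_char : ∀ (wp : List (List String)) (s : PySem.Set Int) (off : Int),
    (wp.foldl
      (fun (st : PySem.Set Int × Int) group =>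
        let pos := st.2 + (group.length : Int)
        ((if group ≠ [] then PySem.Set.add st.1 (pos - 1) else st.1), pos))
      (s, off)).2 = off + ((wp.map List.length).sum : Int)
    ∧ ∀ i : Int, i ∈ (wp.foldl
      (fun (st : PySem.Set Int × Int) group =>
        let pos := st.2 + (group.length : Int)
        ((if group ≠ [] then PySem.Set.add st.1 (pos - 1) else st.1), pos))
      (s, off)).1 ↔ i ∈ s ∨ i ∈ pvBnds wp off := by
  intro wp
  induction wp with
  | nil => intro s off; simp [pvBnds]
  | cons g t ih =>
    intro s off
    simp only [List.foldl_cons]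
    obtain ⟨h2, h1⟩ := ih (if g ≠ [] then PySem.Set.add s (off + (g.length : Int) - 1) else s)
      (off + (g.length : Int))
    constructor
    · rw [h2]; simp only [List.map_cons, List.sum_cons]; push_cast; ring
    · intro i
      rw [h1 i]
      by_cases hg : g = []
      · simp [hg, pvBnds]
      · simp only [ne_eq, hg, not_false_eq_true, if_pos, PySem.Set.mem_add, pvBnds,
          List.mem_append, List.mem_singleton]
        tauto

-- flags of one group of length m, read off positions: map over range off..off+m of (i = off+m-1)
theorem pvRange_flags (m : Nat) (off : Int) (hm : 0 < m) :
    (PySem.List.pyRange off (off + (m : Int)) 1).map (fun i => decide (i = off + (m : Int) - 1))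
      = List.replicate (m - 1) false ++ [true] := by
  have hsplit : off + (m : Int) = (off + (m : Int) - 1) + 1 := by ring
  rw [hsplit, PySem.List.pyRange_one_succ_right (by omega)]
  have hred : off + (m : Int) - 1 + 1 - 1 = off + (m : Int) - 1 := by ring
  rw [hred, List.map_append]
  have hconst : ∀ i ∈ PySem.List.pyRange off (off + (m : Int) - 1) 1,
      decide (i = off + (m : Int) - 1) = false := by
    intro i hi
    rw [PySem.List.mem_pyRange_one] at hi
    simp only [decide_eq_false_iff_not]; omega
  rw [List.map_congr_left hconst, List.map_const', PySem.List.length_pyRange_one]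
  have : (off + (m : Int) - 1 - off).toNat = m - 1 := by omega
  simp [this]

-- A's flags of one non-empty group (enumerate form)
theorem pvEnum_flags (n : Int) : ∀ (l : List String) (k : Int), l ≠ [] → k + l.length = n →
    (PySem.List.enumerate l k).map (fun (p : Int × String) => decide (p.1 = n - 1))
      = List.replicate (l.length - 1) false ++ [true] := by
  intro l
  induction l with
  | nil => intro k h; exact absurd rfl h
  | cons x xs ih =>
    intro k _ hk
    rcases xs with _ | ⟨y, ys⟩
    · simp only [List.length_cons, List.length_nil, Nat.cast_add] at hk
      simp [PySem.List.enumerate_cons, PySem.List.enumerate_nil]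
      omega
    · have hlt : k ≠ n - 1 := by
        simp only [List.length_cons, Nat.cast_add, Nat.cast_one] at hk
        omega
      have := ih (k+1) (by simp) (by simp only [List.length_cons, Nat.cast_add, Nat.cast_one] at hk ⊢; omega)
      rw [PySem.List.enumerate_cons, List.map_cons, this]
      simp only [List.length_cons]
      simp [hlt, List.replicate_succ]

-- main flags lemma: B's positional membership pass equals A's flatMap of enumerate flags
theorem pvFlags_eq : ∀ (wp : List (List String)) (off : Int),
    (PySem.List.pyRange off (off + ((wp.map List.length).sum : Int)) 1).map
        (fun i => decide (i ∈ pvBnds wp off))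
      = wp.flatMap (fun ph =>
          (PySem.List.enumerate ph).map (fun (p : Int × String) => decide (p.1 = (ph.length : Int) - 1))) := by
  intro wp
  induction wp with
  | nil =>
    intro off
    simp only [List.map_nil, List.sum_nil, Nat.cast_zero, add_zero, List.flatMap_nil]
    rw [PySem.List.pyRange_one_eq_nil le_rfl]
    simp
  | cons g t ih =>
    intro off
    have hsum : ((( g :: t).map List.length).sum : Int) = (g.length : Int) + ((t.map List.length).sum : Int) := by
      simp only [List.map_cons, List.sum_cons]; push_cast; ring
    rw [hsum, ← add_assoc,
      PySem.List.pyRange_one_append off (off + (g.length : Int)) _ (by omega) (by omega)]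
    rw [List.map_append, List.flatMap_cons]
    congr 1
    · -- first chunk: only g's own boundary can be hit
      by_cases hg : g = []
      · subst hg
        simp only [List.length_nil, Nat.cast_zero, add_zero, PySem.List.enumerate_nil,
          List.map_nil]
        rw [PySem.List.pyRange_one_eq_nil le_rfl]
        simp
      · have hcong : ∀ i ∈ PySem.List.pyRange off (off + (g.length : Int)) 1,
            decide (i ∈ pvBnds (g :: t) off) = decide (i = off + (g.length : Int) - 1) := by
          intro i hi
          rw [PySem.List.mem_pyRange_one] at hi
          simp only [pvBnds, ne_eq, hg, not_false_eq_true, if_pos, List.mem_append,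
            List.mem_singleton]
          by_cases he : i = off + (g.length : Int) - 1
          · simp [he]
          · have : i ∉ pvBnds t (off + (g.length : Int)) := fun h => by
              have := pvBnds_ge t (off + (g.length : Int)) i h; omega
            simp [he, this]
        rw [List.map_congr_left hcong,
          pvRange_flags g.length off (by cases g with | nil => exact absurd rfl hg | cons a l => simp)]
        exact (pvEnum_flags (g.length : Int) g 0 hg (by simp)).symm
    · -- tail chunk: g's boundary is below the range
      have hcong : ∀ i ∈ PySem.List.pyRange (off + (g.length : Int))
          (off + (g.length : Int) + ((t.map List.length).sum : Int)) 1,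
          decide (i ∈ pvBnds (g :: t) off) = decide (i ∈ pvBnds t (off + (g.length : Int))) := by
        intro i hi
        rw [PySem.List.mem_pyRange_one] at hi
        simp only [pvBnds, List.mem_append]
        by_cases hg : g = []
        · simp [hg]
        · simp only [ne_eq, hg, not_false_eq_true, if_pos, List.mem_singleton]
          have : ¬ (i = off + (g.length : Int) - 1) := by omega
          simp [this]
      rw [List.map_congr_left hcong, ih (off + (g.length : Int))]

-- flatten: fold with ++ equals flatMap
theorem pvFlatten_eq : ∀ (wp : List (List String)) (s : List String),
    wp.foldl (fun acc g => acc ++ g) s = s ++ wp.flatMap (fun g => g) := by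
  intro wp
  induction wp with
  | nil => intro s; simp
  | cons g t ih => intro s; simp [ih, List.append_assoc]

-- ===== VERDICT (by name: the statement is the Claim_ definition above) =====
theorem parse_phoneme_seq_spec : Claim_equal_parse_phoneme_seq := by
  intro wp _
  unfold Spec_parse_phoneme_seq parse_phoneme_seq parse_phoneme_seq_alt
  obtain ⟨h2, h1⟩ := pvFold_char wp PySem.Set.empty 0
  simp only [] at h1 h2 ⊢
  simp only [Prod.mk.injEq]
  constructor
  · rw [pvFlatten_eq wp [], List.nil_append]
  · rw [h2, zero_add]
    have hmem : ∀ i : Int, PySem.Set.contains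
        (wp.foldl
          (fun (st : PySem.Set Int × Int) group =>
            ((if group ≠ [] then PySem.Set.add st.1 (st.2 + (group.length : Int) - 1) else st.1),
              st.2 + (group.length : Int)))
          (PySem.Set.empty, 0)).1 i = decide (i ∈ pvBnds wp 0) := by
      intro i
      have h := h1 i
      simp only [PySem.Set.empty, List.not_mem_nil, false_or] at h
      rw [PySem.Set.contains_eq_listContains, List.contains_eq_mem]
      exact decide_eq_decide.mpr h
    rw [List.map_congr_left (fun i _ => hmem i)]
    have := pvFlags_eq wp 0
    rw [zero_add] at this
    exact this.symm
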